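-- pv_equiv track=rewrite | github.com/binduhegde/leetcode | 2423.py | word_fre
-- ===== SOURCE A (Python) =====
-- def word_fre(word):
--     word_freq ={}
--     for i in word:
--         word_freq[i] = word_freq.get(i, 0)+1
--
--
--     for key, value in word_freq.items():
--         temp = word_freq.copy()
--         if temp[key] == 1: del temp[key]
--         else: temp[key] -= 1
--         if len(set(list(temp.values()))) == 1: return True
--     return False
-- ===== SOURCE B (Python) =====
-- def word_fre(word):
--     counts = {}
--     for ch in word:
--         counts[ch] = counts.get(ch, 0) + 1
--     fof = {}
--     for c in counts.values():
--         fof[c] = fof.get(c, 0) + 1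
--     dts = sorted(fof)
--     if len(dts) == 1:
--         v = dts[0]
--         return v > 1 if len(counts) == 1 else v == 1
--     if len(dts) == 2:
--         a, b = dts
--         return (b == a + 1 and fof[b] == 1) or (a == 1 and fof[a] == 1)
--     return False
-- ===== Notes on version B (the rewrite author's own statement) =====
-- stated objective: alternative
-- what changed: A simulates deleting each letter in turn (a dict copy, a delete/decrement and a set construction per letter); B builds the counter once, then a counter of the frequency values, and decides truthiness by a closed-form case analysis on the sorted distinct frequencies and their multiplicities, with no per-letter simulation.
import Mathlib
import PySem

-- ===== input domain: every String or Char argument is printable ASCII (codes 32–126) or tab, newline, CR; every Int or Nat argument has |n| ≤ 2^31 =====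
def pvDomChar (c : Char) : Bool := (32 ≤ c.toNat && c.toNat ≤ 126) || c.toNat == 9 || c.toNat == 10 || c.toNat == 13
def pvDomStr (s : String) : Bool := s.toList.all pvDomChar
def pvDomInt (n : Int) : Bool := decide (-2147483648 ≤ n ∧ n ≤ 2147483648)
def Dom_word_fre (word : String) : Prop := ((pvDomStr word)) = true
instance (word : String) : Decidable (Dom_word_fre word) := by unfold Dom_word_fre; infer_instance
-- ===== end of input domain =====

-- B replaces A's per-letter deletion simulation (a dict copy, delete and set-build per letter)
-- by a closed-form case analysis on the sorted distinct frequency values and their multiplicities (objective: alternative).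

-- ===== PORT A =====
def word_fre (word : String) : Bool :=
  -- word_freq = {}; for i in word: word_freq[i] = word_freq.get(i, 0) + 1
  let word_freq := word.toList.foldl (fun d i => d.insert i (d.getD i 0 + 1))
      (PySem.Dict.empty : PySem.Dict Char Int)
  -- for key, value in word_freq.items(): …; return True on the first hit, else False
  word_freq.items.any (fun kv =>
    let temp := word_freq
    -- temp[key] (KeyError never fires: key comes from word_freq.items())
    match temp.get? kv.1 with
    | none => false
    | some tv =>
      let temp := if tv == 1 then temp.erase kv.1 else temp.insert kv.1 (tv - 1)
      -- len(set(list(temp.values()))) == 1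
      (PySem.Set.ofList temp.values).length == 1)

-- ===== PORT B =====
def word_fre_alt (word : String) : Bool :=
  -- counts = {}; for ch in word: counts[ch] = counts.get(ch, 0) + 1
  let counts := word.toList.foldl (fun d ch => d.insert ch (d.getD ch 0 + 1))
      (PySem.Dict.empty : PySem.Dict Char Int)
  -- fof = {}; for c in counts.values(): fof[c] = fof.get(c, 0) + 1
  let fof := counts.values.foldl (fun d c => d.insert c (d.getD c 0 + 1))
      (PySem.Dict.empty : PySem.Dict Int Int)
  -- dts = sorted(fof)
  let dts := PySem.List.sorted fof.keys (fun x => x) false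
  match dts with
  | [v] => if counts.size == 1 then decide (1 < v) else v == 1
  | [a, b] => (b == a + 1 && fof.getD b 0 == 1) || (a == 1 && fof.getD a 0 == 1)
  | _ => false

-- ===== PRECONDITION & SPEC =====
def Spec_word_fre (word : String) (out : Bool) : Prop := out = word_fre_alt word
instance (word : String) (out : Bool) : Decidable (Spec_word_fre word out) := by unfold Spec_word_fre; infer_instance

-- ===== CLAIM (what is proved, stated in full; the proofs are below) =====
def Claim_equal_word_fre : Prop := ∀ (word : String), Dom_word_fre word → Spec_word_fre word (word_fre word)

-- ===== LEMMAS AND PROOFS =====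

-- the multiset of letter-counts after deleting one letter whose count is v, described by membership:
-- x survives iff it was a count other than v, or v had multiplicity ≥ 2; and v-1 appears when v > 1
def pvMem1 (L : List Int) (v x : Int) : Prop :=
  (x ∈ L ∧ (x ≠ v ∨ 2 ≤ L.count v)) ∨ (1 < v ∧ x = v - 1)

-- "some one-letter deletion leaves all surviving counts equal (and nonempty)"
def pvE (L : List Int) : Prop :=
  ∃ v ∈ L, ∃ c, pvMem1 L v c ∧ ∀ x, pvMem1 L v x → x = c

-- B's closed-form decision, expressed over the list of letter counts
def pvCF (L : List Int) : Bool :=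
  match PySem.List.sorted (PySem.Set.ofList L) (fun x => x) false with
  | [v] => if L.length == 1 then decide (1 < v) else v == 1
  | [a, b] => (b == a + 1 && ((L.count b : Int) == 1)) || (a == 1 && ((L.count a : Int) == 1))
  | _ => false

lemma pvP_iff (M : List Int) :
    (((PySem.Set.ofList M).length == 1) = true) ↔ ∃ c, c ∈ M ∧ ∀ x ∈ M, x = c := by
  rw [beq_iff_eq, List.length_eq_one_iff]
  constructor
  · rintro ⟨a, ha⟩
    refine ⟨a, ?_, ?_⟩
    · have : a ∈ PySem.Set.ofList M := by rw [ha]; exact List.mem_singleton_self a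
      exact (PySem.Set.mem_ofList _ _).mp this
    · intro x hx
      have : x ∈ PySem.Set.ofList M := (PySem.Set.mem_ofList _ _).mpr hx
      rw [ha] at this; simpa using this
  · rintro ⟨c, hc, hall⟩
    refine ⟨c, ?_⟩
    have hnd := PySem.Set.nodup_ofList M
    have hmem : ∀ x ∈ PySem.Set.ofList M, x = c := fun x hx => hall x ((PySem.Set.mem_ofList _ _).mp hx)
    have hcm : c ∈ PySem.Set.ofList M := (PySem.Set.mem_ofList _ _).mpr hc
    cases h : PySem.Set.ofList M with
    | nil => rw [h] at hcm; simp at hcm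
    | cons y t =>
      rw [h] at hmem hnd
      have hy : y = c := hmem y (List.mem_cons_self)
      have ht : t = [] := by
        cases t with
        | nil => rfl
        | cons z t' =>
          have hz : z = c := hmem z (by simp)
          exfalso
          have := hnd
          simp [List.nodup_cons] at this
          exact this.1.1 (by rw [hy, hz])
      rw [hy, ht]
lemma pv_two_le_countP {α : Type} [DecidableEq α] (l : List α) (p : α → Bool)
    {a b : α} (ha : a ∈ l) (hb : b ∈ l) (hab : a ≠ b) (hpa : p a = true) (hpb : p b = true) :
    2 ≤ l.countP p := by
  rw [List.countP_eq_length_filter]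
  have hsub : ({a, b} : Finset α) ⊆ (l.filter p).toFinset := by
    intro x hx
    rcases Finset.mem_insert.mp hx with rfl | hx
    · exact List.mem_toFinset.mpr (List.mem_filter.mpr ⟨ha, hpa⟩)
    · rcases Finset.mem_singleton.mp hx with rfl
      exact List.mem_toFinset.mpr (List.mem_filter.mpr ⟨hb, hpb⟩)
  calc 2 = ({a, b} : Finset α).card := (Finset.card_pair hab).symm
    _ ≤ (l.filter p).toFinset.card := Finset.card_le_card hsub
    _ ≤ (l.filter p).length := List.toFinset_card_le _
lemma pv_exists_other {α : Type} (l : List α) (p : α → Bool) (hnd : l.Nodup)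
    (h2 : 2 ≤ l.countP p) (k : α) : ∃ k' ∈ l, k' ≠ k ∧ p k' = true := by
  rw [List.countP_eq_length_filter] at h2
  have hndf : (l.filter p).Nodup := hnd.filter p
  match hf : l.filter p with
  | [] => rw [hf] at h2; simp at h2
  | [x] => rw [hf] at h2; simp at h2
  | x :: y :: t =>
    rw [hf] at hndf
    have hxy : x ≠ y := by
      have hx := (List.nodup_cons.mp hndf).1
      intro h; exact hx (by rw [h]; exact List.mem_cons_self)
    have hxm : x ∈ l.filter p := by rw [hf]; simp
    have hym : y ∈ l.filter p := by rw [hf]; simp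
    by_cases hxk : x = k
    · exact ⟨y, (List.mem_filter.mp hym).1, fun h => hxy (hxk ▸ h ▸ rfl), (List.mem_filter.mp hym).2⟩
    · exact ⟨x, (List.mem_filter.mp hxm).1, hxk, (List.mem_filter.mp hxm).2⟩
lemma pv_count_map (S : List Char) (cnt : Char → Int) (y : Int) :
    (S.map cnt).count y = S.countP (fun k' => cnt k' == y) := by
  simp [List.count, List.countP_map]; rfl
lemma pv_mem_others_iff (S : List Char) (hnd : S.Nodup) (cnt : Char → Int) {k : Char}
    (hk : k ∈ S) (x : Int) :
    (∃ k' ∈ S, k' ≠ k ∧ cnt k' = x) ↔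
      (x ∈ S.map cnt ∧ (x ≠ cnt k ∨ 2 ≤ (S.map cnt).count (cnt k))) := by
  rw [pv_count_map]
  constructor
  · rintro ⟨k', hk', hne, rfl⟩
    refine ⟨List.mem_map_of_mem hk', ?_⟩
    by_cases hx : cnt k' = cnt k
    · exact Or.inr (pv_two_le_countP S _ hk' hk hne (by simp [hx]) (by simp))
    · exact Or.inl hx
  · rintro ⟨hxm, hcase⟩
    rcases List.mem_map.mp hxm with ⟨k'', hk'', rfl⟩
    by_cases hks : k'' = k
    · subst hks
      rcases hcase with hne | h2
      · exact absurd rfl hne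
      · rcases pv_exists_other S _ hnd h2 k'' with ⟨k', hk', hne, hp⟩
        exact ⟨k', hk', hne, by simpa using hp⟩
    · exact ⟨k'', hk'', hks, rfl⟩
lemma pv_values_counter (s : List Char) :
    (PySem.Dict.counter s).values = (PySem.Set.ofList s).map (fun k => (s.count k : Int)) := by
  simp [PySem.Dict.values, PySem.Dict.items_counter, List.map_map]
lemma pv_erase_values (s : List Char) (k : Char) :
    ((PySem.Dict.counter s).erase k).values =
      ((PySem.Set.ofList s).filter (fun k' => !(k' == k))).map (fun k' => (s.count k' : Int)) := by
  simp [PySem.Dict.erase, PySem.Dict.values, PySem.Dict.items_counter, List.filter_map,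
    List.map_map]
  rfl
lemma pv_insert_values (s : List Char) (k : Char) (hk : k ∈ s) (w : Int) :
    ((PySem.Dict.counter s).insert k w).values =
      (PySem.Set.ofList s).map (fun k' => if k' == k then w else (s.count k' : Int)) := by
  rw [PySem.Dict.values, PySem.Dict.items_insert_of_contains _ w
      (by rw [PySem.Dict.contains_counter]; simpa using hk)]
  rw [PySem.Dict.items_counter, List.map_map, List.map_map]
  apply List.map_congr_left
  intro k' _
  by_cases h : k' = k <;> simp [h]
lemma pvP_transport (M : List Int) (P : Int → Prop) (h : ∀ x, x ∈ M ↔ P x) :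
    (((PySem.Set.ofList M).length == 1) = true) ↔ ∃ c, P c ∧ ∀ x, P x → x = c := by
  rw [pvP_iff]
  constructor
  · rintro ⟨c, hc, hall⟩; exact ⟨c, (h c).mp hc, fun x hx => hall x ((h x).mpr hx)⟩
  · rintro ⟨c, hc, hall⟩; exact ⟨c, (h c).mpr hc, fun x hx => hall x ((h x).mp hx)⟩

lemma pv_check_iff (s : List Char) (k : Char) (hk : k ∈ s) :
    (((PySem.Set.ofList (if ((s.count k : Int)) == 1 then ((PySem.Dict.counter s).erase k)
        else ((PySem.Dict.counter s).insert k ((s.count k : Int) - 1))).values).length == 1) = true)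
    ↔ (∃ c, pvMem1 ((PySem.Set.ofList s).map (fun k' => (s.count k' : Int))) ((s.count k : Int)) c ∧
        ∀ x, pvMem1 ((PySem.Set.ofList s).map (fun k' => (s.count k' : Int))) ((s.count k : Int)) x → x = c) := by
  have hkS : k ∈ PySem.Set.ofList s := (PySem.Set.mem_ofList _ _).mpr hk
  have hnd : (PySem.Set.ofList s).Nodup := PySem.Set.nodup_ofList s
  by_cases h1 : s.count k = 1
  · rw [if_pos (by simp [h1])]
    rw [pv_erase_values]
    apply pvP_transport
    intro x
    have hmm : (∃ k' ∈ PySem.Set.ofList s, k' ≠ k ∧ (s.count k' : Int) = x) ↔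
        (x ∈ (PySem.Set.ofList s).map (fun k' => (s.count k' : Int)) ∧
          (x ≠ (s.count k : Int) ∨ 2 ≤ ((PySem.Set.ofList s).map (fun k' => (s.count k' : Int))).count ((s.count k : Int)))) :=
      pv_mem_others_iff _ hnd _ hkS x
    constructor
    · intro hx
      rcases List.mem_map.mp hx with ⟨k', hk', rfl⟩
      rcases List.mem_filter.mp hk' with ⟨hk'S, hne⟩
      exact Or.inl (hmm.mp ⟨k', hk'S, by simpa using hne, rfl⟩)
    · rintro (⟨hxL, hcase⟩ | ⟨hlt, _⟩)
      · rcases hmm.mpr ⟨hxL, hcase⟩ with ⟨k', hk'S, hne, rfl⟩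
        exact List.mem_map_of_mem (List.mem_filter.mpr ⟨hk'S, by simpa using hne⟩)
      · exfalso; rw [h1] at hlt; exact absurd hlt (by norm_num)
  · rw [if_neg (by simp [h1])]
    have hge : 1 ≤ s.count k := List.count_pos_iff.mpr hk
    have h2n : 2 ≤ s.count k := by omega
    have hv : (1 : Int) < (s.count k : Int) := by exact_mod_cast h2n
    rw [pv_insert_values s k hk]
    apply pvP_transport
    intro x
    have hmm : (∃ k' ∈ PySem.Set.ofList s, k' ≠ k ∧ (s.count k' : Int) = x) ↔
        (x ∈ (PySem.Set.ofList s).map (fun k' => (s.count k' : Int)) ∧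
          (x ≠ (s.count k : Int) ∨ 2 ≤ ((PySem.Set.ofList s).map (fun k' => (s.count k' : Int))).count ((s.count k : Int)))) :=
      pv_mem_others_iff _ hnd _ hkS x
    constructor
    · intro hx
      rcases List.mem_map.mp hx with ⟨k', hk', hx'⟩
      by_cases hks : k' = k
      · right; exact ⟨hv, by rw [← hx', if_pos (by simp [hks])]⟩
      · left
        rw [if_neg (by simpa using hks)] at hx'
        exact hmm.mp ⟨k', hk', hks, hx'⟩
    · rintro (h | ⟨_, rfl⟩)
      · rcases hmm.mpr h with ⟨k', hk'S, hne, rfl⟩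
        exact List.mem_map.mpr ⟨k', hk'S, by rw [if_neg (by simpa using hne)]⟩
      · exact List.mem_map.mpr ⟨k, hkS, by rw [if_pos (by simp)]⟩

lemma pvA_iff (word : String) :
    (word_fre word = true) ↔
      pvE ((PySem.Set.ofList word.toList).map (fun k => (word.toList.count k : Int))) := by
  unfold word_fre
  simp only [PySem.Dict.foldl_insert_getD_add_one_eq_counter]
  rw [PySem.Dict.items_counter, List.any_map, List.any_eq_true]
  unfold pvE
  constructor
  · rintro ⟨k, hkS, hchk⟩
    have hget : (PySem.Dict.counter word.toList).get? k = some ((word.toList.count k : Int)) := by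
      rw [PySem.Dict.get?_eq_some_iff_mem_items _ _ _ (PySem.Dict.nodup_keys_counter _),
        PySem.Dict.items_counter]
      exact List.mem_map_of_mem hkS
    simp only [Function.comp, hget] at hchk
    have hk : k ∈ word.toList := (PySem.Set.mem_ofList _ _).mp hkS
    rcases (pv_check_iff word.toList k hk).mp hchk with ⟨c, hc, hall⟩
    exact ⟨(word.toList.count k : Int), List.mem_map_of_mem hkS, c, hc, hall⟩
  · rintro ⟨v, hvL, c, hc, hall⟩
    rcases List.mem_map.mp hvL with ⟨k, hkS, rfl⟩
    have hk : k ∈ word.toList := (PySem.Set.mem_ofList _ _).mp hkS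
    refine ⟨k, hkS, ?_⟩
    have hget : (PySem.Dict.counter word.toList).get? k = some ((word.toList.count k : Int)) := by
      rw [PySem.Dict.get?_eq_some_iff_mem_items _ _ _ (PySem.Dict.nodup_keys_counter _),
        PySem.Dict.items_counter]
      exact List.mem_map_of_mem hkS
    simp only [Function.comp, hget]
    exact (pv_check_iff word.toList k hk).mpr ⟨c, hc, hall⟩

lemma word_fre_alt_eq (word : String) :
    word_fre_alt word = pvCF ((PySem.Dict.counter word.toList).values) := by
  unfold word_fre_alt pvCF
  simp only [PySem.Dict.foldl_insert_getD_add_one_eq_counter, PySem.Dict.keys_counter,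
    PySem.Dict.getD_counter]
  have hsize : (PySem.Dict.counter word.toList).size =
      ((PySem.Dict.counter word.toList).values).length := by
    simp [PySem.Dict.size, PySem.Dict.values]
  simp only [hsize]
lemma pv_no_two (L : List Int) (v x y : Int) (hx : x ∈ L) (hy : y ∈ L) (hxy : x ≠ y)
    (hxv : x ≠ v) (hyv : y ≠ v) (c : Int) (hall : ∀ z, pvMem1 L v z → z = c) : False :=
  hxy (by rw [hall x (Or.inl ⟨hx, Or.inl hxv⟩), hall y (Or.inl ⟨hy, Or.inl hyv⟩)])

lemma pvB_iff (L : List Int) (h1 : ∀ x ∈ L, 1 ≤ x) : (pvCF L = true) ↔ pvE L := by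
  unfold pvCF
  have hperm : (PySem.List.sorted (PySem.Set.ofList L) (fun x => x) false).Perm (PySem.Set.ofList L) :=
    PySem.List.sorted_perm _ _ _
  have hmem : ∀ x, x ∈ PySem.List.sorted (PySem.Set.ofList L) (fun x => x) false ↔ x ∈ L := by
    intro x; rw [hperm.mem_iff, PySem.Set.mem_ofList]
  have hnd : (PySem.List.sorted (PySem.Set.ofList L) (fun x => x) false).Nodup :=
    hperm.nodup_iff.mpr (PySem.Set.nodup_ofList L)
  have hpw := PySem.List.sorted_pairwise (PySem.Set.ofList L) (fun x => x)
  match hdts : PySem.List.sorted (PySem.Set.ofList L) (fun x => x) false with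
  | [] =>
    rw [hdts] at hmem
    have hL : L = [] := List.eq_nil_iff_forall_not_mem.mpr (fun x hx => by simpa using (hmem x).mpr hx)
    subst hL
    simp [pvE]
  | [v] =>
    dsimp only
    rw [hdts] at hmem
    have hv : v ∈ L := (hmem v).mp (by simp)
    have hall : ∀ x ∈ L, x = v := fun x hx => by simpa using (hmem x).mpr hx
    by_cases hlen : L.length = 1
    · rcases List.length_eq_one_iff.mp hlen with ⟨x, rfl⟩
      have hxv : x = v := hall x (by simp)
      subst hxv
      rw [if_pos (show ([x].length == 1) = true from rfl), decide_eq_true_eq]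
      constructor
      · intro hlt
        refine ⟨x, by simp, x - 1, Or.inr ⟨hlt, rfl⟩, ?_⟩
        rintro z (⟨hz, hcase⟩ | ⟨-, rfl⟩)
        · have hz' : z = x := by simpa using hz
          subst hz'
          rcases hcase with h' | h'
          · exact absurd rfl h'
          · simp at h'
        · rfl
      · rintro ⟨v', hv', c, hc, -⟩
        have hv'x : v' = x := by simpa using hv'
        subst hv'x
        rcases hc with ⟨hcL, hcase⟩ | ⟨hlt, -⟩
        · have hcx : c = v' := by simpa using hcL
          subst hcx
          rcases hcase with h' | h'
          · exact absurd rfl h'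
          · simp at h'
        · exact hlt
    · have hne : L ≠ [] := fun h => by simp [h] at hv
      have hlen2 : 2 ≤ L.length := by
        have := List.length_pos_iff.mpr hne
        omega
      have hcount : L.count v = L.length := List.count_eq_length.mpr (fun b hb => (hall b hb).symm)
      have h2 : 2 ≤ L.count v := by omega
      have hlenb : (L.length == 1) = false := by simp [hlen]
      simp only [hlenb, Bool.false_eq_true, if_false]
      rw [beq_iff_eq]
      constructor
      · intro hv1
        refine ⟨v, hv, v, Or.inl ⟨hv, Or.inr h2⟩, ?_⟩
        rintro z (⟨hz, -⟩ | ⟨hlt, -⟩)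
        · exact hall z hz
        · rw [hv1] at hlt; exact absurd hlt (by norm_num)
      · rintro ⟨v', hv', c, hc, hallc⟩
        have hvv : v' = v := hall v' hv'
        subst hvv
        by_contra hne1
        have hvge : 1 ≤ v' := h1 v' hv
        have hlt : 1 < v' := lt_of_le_of_ne hvge (fun h => hne1 h.symm)
        have e1 : v' = c := hallc v' (Or.inl ⟨hv, Or.inr h2⟩)
        have e2 : v' - 1 = c := hallc (v' - 1) (Or.inr ⟨hlt, rfl⟩)
        omega
  | [a, b] =>
    dsimp only
    rw [hdts] at hmem hnd hpw
    have ha : a ∈ L := (hmem a).mp (by simp)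
    have hb : b ∈ L := (hmem b).mp (by simp)
    have hsub : ∀ x ∈ L, x = a ∨ x = b := fun x hx => by simpa using (hmem x).mpr hx
    have hab_le : a ≤ b := by
      have := List.pairwise_cons.mp hpw
      simpa using this.1 b (by simp)
    have hab_ne : a ≠ b := by
      have := (List.nodup_cons.mp hnd).1
      simpa using this
    have hab : a < b := lt_of_le_of_ne hab_le hab_ne
    have h1a : 1 ≤ a := h1 a ha
    have h1b : (1 : Int) < b := by omega
    have hca : 1 ≤ L.count a := List.count_pos_iff.mpr ha
    have hcb : 1 ≤ L.count b := List.count_pos_iff.mpr hb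
    have key : pvE L ↔ ((b = a + 1 ∧ L.count b = 1) ∨ (a = 1 ∧ L.count a = 1)) := by
      constructor
      · rintro ⟨v, hv, c, hc, hallc⟩
        rcases hsub v hv with rfl | rfl
        · right
          have ha1 : v = 1 := by
            by_contra hne1
            have hlt : 1 < v := lt_of_le_of_ne h1a (fun h => hne1 h.symm)
            have e1 : v - 1 = c := hallc (v - 1) (Or.inr ⟨hlt, rfl⟩)
            have e2 : b = c := hallc b (Or.inl ⟨hb, Or.inl (by omega)⟩)
            omega
          refine ⟨ha1, ?_⟩
          by_contra hcnt
          have h2 : 2 ≤ L.count v := by omega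
          have e1 : v = c := hallc v (Or.inl ⟨hv, Or.inr h2⟩)
          have e2 : b = c := hallc b (Or.inl ⟨hb, Or.inl (by omega)⟩)
          omega
        · left
          have e1 : v - 1 = c := hallc (v - 1) (Or.inr ⟨h1b, rfl⟩)
          have e2 : a = c := hallc a (Or.inl ⟨ha, Or.inl (by omega)⟩)
          constructor
          · omega
          · by_contra hcnt
            have h2 : 2 ≤ L.count v := by omega
            have e3 : v = c := hallc v (Or.inl ⟨hv, Or.inr h2⟩)
            omega
      · rintro (⟨hba, hcb1⟩ | ⟨ha1, hca1⟩)
        · refine ⟨b, hb, a, Or.inl ⟨ha, Or.inl (by omega)⟩, ?_⟩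
          rintro z (⟨hz, hcase⟩ | ⟨-, rfl⟩)
          · rcases hsub z hz with rfl | rfl
            · rfl
            · rcases hcase with h' | h'
              · exact absurd rfl h'
              · omega
          · omega
        · refine ⟨a, ha, b, Or.inl ⟨hb, Or.inl (by omega)⟩, ?_⟩
          rintro z (⟨hz, hcase⟩ | ⟨hlt, -⟩)
          · rcases hsub z hz with rfl | rfl
            · rcases hcase with h' | h'
              · omega
              · omega
            · rfl
          · omega
    rw [key]
    constructor
    · intro h
      rcases Bool.or_eq_true_iff.mp h with h' | h'
      · rcases Bool.and_eq_true_iff.mp h' with ⟨e1, e2⟩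
        exact Or.inl ⟨by simpa using e1, by
          have : ((L.count b : Int)) = 1 := by simpa using e2
          exact_mod_cast this⟩
      · rcases Bool.and_eq_true_iff.mp h' with ⟨e1, e2⟩
        exact Or.inr ⟨by simpa using e1, by
          have : ((L.count a : Int)) = 1 := by simpa using e2
          exact_mod_cast this⟩
    · rintro (⟨e1, e2⟩ | ⟨e1, e2⟩)
      · apply Bool.or_eq_true_iff.mpr
        left
        apply Bool.and_eq_true_iff.mpr
        exact ⟨by simpa using e1, by simp [e2]⟩
      · apply Bool.or_eq_true_iff.mpr
        right
        apply Bool.and_eq_true_iff.mpr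
        exact ⟨by simpa using e1, by simp [e2]⟩
  | a :: b :: c :: t =>
    dsimp only
    rw [hdts] at hmem hnd
    have ha : a ∈ L := (hmem a).mp (by simp)
    have hb : b ∈ L := (hmem b).mp (by simp)
    have hc : c ∈ L := (hmem c).mp (by simp)
    have hab : a ≠ b := by
      have := (List.nodup_cons.mp hnd).1
      intro h; exact this (by rw [h]; simp)
    have hac : a ≠ c := by
      have := (List.nodup_cons.mp hnd).1
      intro h; exact this (by rw [h]; simp)
    have hbc : b ≠ c := by
      have := (List.nodup_cons.mp (List.nodup_cons.mp hnd).2).1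
      intro h; exact this (by rw [h]; simp)
    simp only [Bool.false_eq_true, false_iff]
    rintro ⟨v, hv, c0, -, hallc⟩
    by_cases hav : a = v
    · exact pv_no_two L v b c hb hc hbc (by omega) (by omega) c0 hallc
    · by_cases hbv : b = v
      · exact pv_no_two L v a c ha hc hac (by omega) (by omega) c0 hallc
      · exact pv_no_two L v a b ha hb hab hav hbv c0 hallc

-- ===== VERDICT (by name: the statement is the Claim_ definition above) =====
theorem word_fre_spec : Claim_equal_word_fre := by
  intro word _
  unfold Spec_word_fre
  have h1 : ∀ x ∈ (PySem.Set.ofList word.toList).map (fun k => (word.toList.count k : Int)), 1 ≤ x := by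
    intro x hx
    rcases List.mem_map.mp hx with ⟨k, hk, rfl⟩
    have hmem : k ∈ word.toList := (PySem.Set.mem_ofList _ _).mp hk
    have : 0 < word.toList.count k := List.count_pos_iff.mpr hmem
    exact_mod_cast this
  have hB : (word_fre_alt word = true) ↔
      pvE ((PySem.Set.ofList word.toList).map (fun k => (word.toList.count k : Int))) := by
    rw [word_fre_alt_eq, pv_values_counter]
    exact pvB_iff _ h1
  have := (pvA_iff word).trans hB.symm
  cases hA : word_fre word <;> cases hAlt : word_fre_alt word <;> simp_all
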